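-- pv_equiv track=rewrite | github.com/Jawad-Ahmed1/timetable_Schedular | src/ga_timetable.py | get_lecture_blocks
-- ===== SOURCE A (Python) =====
-- def get_lecture_blocks(hours):
--     """Convert total hours to lecture blocks (1 hour = 1 slot)"""
--     blocks = []
--     if hours <= 0:
--         return blocks
--
--     # For 4-hour courses: 2 lectures of 2 hours each
--     if hours == 4:
--         blocks = [2, 2]  # Two 2-hour lectures
--     elif hours == 3:
--         blocks = [3]     # One 3-hour lecture
--     elif hours == 2:
--         blocks = [2]     # One 2-hour lecture
--     elif hours == 1:
--         blocks = [1]     # One 1-hour lecture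
--     else:
--         # For other values, split into reasonable blocks
--         while hours > 0:
--             if hours >= 3:
--                 blocks.append(3)
--                 hours -= 3
--             elif hours >= 2:
--                 blocks.append(2)
--                 hours -= 2
--             else:
--                 blocks.append(1)
--                 hours -= 1
--
--     return blocks
-- ===== SOURCE B (Python) =====
-- def get_lecture_blocks(hours):
--     """Convert total hours to lecture blocks (1 hour = 1 slot)"""
--     if hours <= 0:
--         return []
--     if hours == 4:
--         return [2, 2]
--     q, r = divmod(hours, 3)
--     return [3] * q + ([r] if r > 0 else [])
-- ===== Notes on version B (the rewrite author's own statement) =====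
-- stated objective: simpler
-- what changed: Replaces the greedy subtraction loop and the per-value special cases with closed-form integer arithmetic: divmod by 3 gives the count of 3-hour blocks plus the remainder block, keeping only the 4-hour special case.
import Mathlib
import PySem

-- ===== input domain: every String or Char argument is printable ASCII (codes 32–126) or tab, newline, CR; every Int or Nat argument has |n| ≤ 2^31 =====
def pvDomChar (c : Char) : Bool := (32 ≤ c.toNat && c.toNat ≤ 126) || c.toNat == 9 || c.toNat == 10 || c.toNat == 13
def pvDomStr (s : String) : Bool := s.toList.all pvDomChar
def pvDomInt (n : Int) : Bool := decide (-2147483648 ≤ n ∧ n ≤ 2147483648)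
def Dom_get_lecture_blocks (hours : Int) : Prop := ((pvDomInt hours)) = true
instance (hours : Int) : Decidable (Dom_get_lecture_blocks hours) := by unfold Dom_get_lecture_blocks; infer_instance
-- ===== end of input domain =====

-- B replaces A's greedy subtraction loop and small-value special cases with closed-form
-- divmod arithmetic (objective: simpler); same return value for every int input.

-- ===== PORT A =====
-- the 'while hours > 0' greedy loop of A, appending to 'blocks' (accumulator kept, append at the end)
def pvLoopA (hours : Int) (blocks : List Int) : List Int :=
  if hours > 0 then
    if hours ≥ 3 then pvLoopA (hours - 3) (blocks ++ [3])
    else if hours ≥ 2 then pvLoopA (hours - 2) (blocks ++ [2])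
    else pvLoopA (hours - 1) (blocks ++ [1])
  else blocks
termination_by hours.toNat
decreasing_by all_goals omega

def get_lecture_blocks (hours : Int) : List Int :=
  if hours ≤ 0 then []
  else if hours = 4 then [2, 2]
  else if hours = 3 then [3]
  else if hours = 2 then [2]
  else if hours = 1 then [1]
  else pvLoopA hours []

-- ===== PORT B =====
-- [3] * q : q is nonnegative here (hours > 0); List.replicate q.toNat matches Python list repetition
def get_lecture_blocks_alt (hours : Int) : List Int :=
  if hours ≤ 0 then []
  else if hours = 4 then [2, 2]
  else
    let q := PySem.Int.floordiv hours 3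
    let r := PySem.Int.mod hours 3
    List.replicate q.toNat 3 ++ (if r > 0 then [r] else [])

-- ===== PRECONDITION & SPEC =====
def Spec_get_lecture_blocks (hours : Int) (out : List Int) : Prop := out = get_lecture_blocks_alt hours
instance (hours : Int) (out : List Int) : Decidable (Spec_get_lecture_blocks hours out) := by unfold Spec_get_lecture_blocks; infer_instance

-- ===== CLAIM (what is proved, stated in full; the proofs are below) =====
def Claim_equal_get_lecture_blocks : Prop := ∀ (hours : Int), Dom_get_lecture_blocks hours → Spec_get_lecture_blocks hours (get_lecture_blocks hours)

-- ===== LEMMAS AND PROOFS =====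

-- closed form of the greedy loop (proof-only helper)
def pvCF (h : Int) : List Int :=
  if h ≤ 0 then []
  else List.replicate (h / 3).toNat 3 ++ (if h % 3 > 0 then [h % 3] else [])

lemma pvLoopA_closed : ∀ (n : Nat) (h : Int) (b : List Int), h.toNat = n →
    pvLoopA h b = b ++ pvCF h := by
  intro n
  induction n using Nat.strong_induction_on with
  | _ n ih =>
    intro h b hn
    conv_lhs => rw [pvLoopA]
    by_cases hpos : h > 0
    · rw [if_pos hpos]
      by_cases hge : h ≥ 3
      · rw [if_pos hge]
        rw [ih (h - 3).toNat (by omega) (h - 3) (b ++ [3]) rfl]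
        unfold pvCF
        by_cases h3 : h = 3
        · subst h3; norm_num
        · have hq' : h / 3 = (h - 3) / 3 + 1 := by
            conv_lhs => rw [show h = (h - 3) + 1 * 3 by ring]
            rw [Int.add_mul_ediv_right _ _ (by norm_num)]
          have hnn : 0 ≤ (h - 3) / 3 := Int.ediv_nonneg (by omega) (by norm_num)
          have hq : (h / 3).toNat = ((h - 3) / 3).toNat + 1 := by omega
          have hr : h % 3 = (h - 3) % 3 := by omega
          rw [if_neg (by omega : ¬ h - 3 ≤ 0), if_neg (by omega : ¬ h ≤ 0),
            hq, hr, List.replicate_succ]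
          simp
      · rw [if_neg hge]
        by_cases hge2 : h ≥ 2
        · have h2 : h = 2 := by omega
          subst h2
          rw [if_pos (by norm_num)]
          rw [ih 0 (by omega) (2 - 2) (b ++ [2]) (by norm_num)]
          norm_num [pvCF]
        · have h1 : h = 1 := by omega
          subst h1
          rw [if_neg (by norm_num)]
          rw [ih 0 (by omega) (1 - 1) (b ++ [1]) (by norm_num)]
          norm_num [pvCF]
    · rw [if_neg hpos]
      unfold pvCF
      rw [if_pos (by omega)]
      simp

-- ===== VERDICT (by name: the statement is the Claim_ definition above) =====
theorem get_lecture_blocks_spec : Claim_equal_get_lecture_blocks := by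
  intro hours _
  unfold Spec_get_lecture_blocks get_lecture_blocks get_lecture_blocks_alt
  by_cases h0 : hours ≤ 0
  · simp [h0]
  · rw [if_neg h0, if_neg h0]
    by_cases h4 : hours = 4
    · simp [h4]
    · rw [if_neg h4, if_neg h4]
      have hfd : PySem.Int.floordiv hours 3 = hours / 3 :=
        PySem.Int.floordiv_eq_ediv_of_pos (by omega)
      have hmd : PySem.Int.mod hours 3 = hours % 3 :=
        PySem.Int.mod_eq_emod_of_pos (by omega)
      rw [hfd, hmd]
      by_cases h3 : hours = 3
      · subst h3; decide
      · by_cases h2 : hours = 2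
        · subst h2; decide
        · by_cases h1 : hours = 1
          · subst h1; decide
          · rw [if_neg h3, if_neg h2, if_neg h1,
              pvLoopA_closed hours.toNat hours [] rfl, pvCF, if_neg h0]
            simp
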